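-- pv_equiv track=rewrite | github.com/abdulrahimiqbal/aristotle_new_orchestrator | src/orchestrator/research_packets.py | _coerce_reference_list
-- ===== SOURCE A (Python) =====
-- from typing import Any
--
-- def _clip(text: Any, limit: int) -> str:
--     if text is None:
--         return ""
--     return str(text).strip()[:limit]
--
-- def _coerce_reference_list(raw: Any) -> list[dict[str, str]]:
--     if not isinstance(raw, list):
--         return []
--     out: list[dict[str, str]] = []
--     for item in raw[:12]:
--         if not isinstance(item, dict):
--             continue
--         title = _clip(item.get("title"), 200)
--         url = _clip(item.get("url"), 500)
--         note = _clip(item.get("note"), 500)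
--         if not (title or url or note):
--             continue
--         entry: dict[str, str] = {}
--         if title:
--             entry["title"] = title
--         if url:
--             entry["url"] = url
--         if note:
--             entry["note"] = note
--         out.append(entry)
--     return out
-- ===== SOURCE B (Python) =====
-- from typing import Any
--
-- def _clip(text: Any, limit: int) -> str:
--     if text is None:
--         return ""
--     return str(text).strip()[:limit]
--
-- _FIELDS = (("title", 200), ("url", 500), ("note", 500))
--
-- def _entry_of(item: Any) -> dict:
--     entry: dict = {}
--     for key, limit in _FIELDS:
--         clipped = _clip(item.get(key), limit)
--         if clipped:
--             entry[key] = clipped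
--     return entry
--
-- def _collect(items: list, budget: int) -> list:
--     # recursion with an explicit budget counter, building the output back-to-front
--     if budget == 0 or not items:
--         return []
--     rest = _collect(items[1:], budget - 1)
--     item = items[0]
--     if not isinstance(item, dict):
--         return rest
--     entry = _entry_of(item)
--     return [entry] + rest if entry else rest
--
-- def _coerce_reference_list(raw: Any) -> list:
--     if not isinstance(raw, list):
--         return []
--     return _collect(raw, 12)
-- ===== Notes on version B (the rewrite author's own statement) =====
-- stated objective: alternative
-- what changed: Replaces A's imperative loop over raw[:12] with three hardcoded clip/insert blocks and an append accumulator by a recursive collector with an explicit budget counter that builds the result back-to-front by prepending, and a data-driven field table for the per-item entry.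
import Mathlib
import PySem

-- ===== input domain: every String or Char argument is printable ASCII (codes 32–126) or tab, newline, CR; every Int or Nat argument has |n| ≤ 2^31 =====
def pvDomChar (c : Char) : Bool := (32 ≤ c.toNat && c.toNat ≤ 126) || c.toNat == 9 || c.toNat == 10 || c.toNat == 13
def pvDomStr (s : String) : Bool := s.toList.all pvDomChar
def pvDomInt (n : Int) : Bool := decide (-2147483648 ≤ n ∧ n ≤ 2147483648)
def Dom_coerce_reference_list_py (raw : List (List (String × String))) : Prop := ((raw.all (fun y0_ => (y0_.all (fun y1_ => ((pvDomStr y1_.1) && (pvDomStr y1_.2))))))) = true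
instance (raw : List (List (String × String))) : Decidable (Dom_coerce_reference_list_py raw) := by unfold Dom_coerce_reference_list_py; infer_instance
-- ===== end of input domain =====

-- B replaces A's accumulator loop over raw[:12] with a recursive collector that
-- carries an explicit budget counter and builds the output back-to-front, and a
-- data-driven field table for the per-item entry (objective: alternative).

-- shared module helper: _clip(text, limit) — str(text).strip()[:limit], "" for None
def pvClip (text : Option String) (limit : Int) : String :=
  match text with
  | none => ""
  | some s => String.ofList (PySem.List.slice (PySem.Chars.strip s.toList) none (some limit))

-- ===== PORT A =====
-- isinstance checks are always true under the type convention (raw : list of dicts).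
def coerce_reference_list_py (raw : List (List (String × String))) : List (List (String × String)) :=
  (PySem.List.slice raw none (some 12)).foldl
    (fun out item =>
      let title := pvClip ((PySem.Dict.mk item).get? "title") 200
      let url := pvClip ((PySem.Dict.mk item).get? "url") 500
      let note := pvClip ((PySem.Dict.mk item).get? "note") 500
      if ¬(title ≠ "" ∨ url ≠ "" ∨ note ≠ "") then out
      else
        let entry : PySem.Dict String String := PySem.Dict.empty
        let entry := if title ≠ "" then entry.insert "title" title else entry
        let entry := if url ≠ "" then entry.insert "url" url else entry
        let entry := if note ≠ "" then entry.insert "note" note else entry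
        out ++ [entry.items]) []

-- ===== PORT B =====
def pvFields : List (String × Int) := [("title", 200), ("url", 500), ("note", 500)]

-- _entry_of: data-driven field loop building the per-item dict
def pvEntryOf (item : List (String × String)) : List (String × String) :=
  (pvFields.foldl
    (fun e kl =>
      let clipped := pvClip ((PySem.Dict.mk item).get? kl.1) kl.2
      if clipped ≠ "" then e.insert kl.1 clipped else e)
    (PySem.Dict.empty : PySem.Dict String String)).items

-- _collect: recursion with an explicit budget counter, prepending entries
def pvCollect (items : List (List (String × String))) (budget : Nat) : List (List (String × String)) :=
  match budget, items with
  | 0, _ => []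
  | _, [] => []
  | Nat.succ b, item :: rest =>
    let tail := pvCollect rest b
    let entry := pvEntryOf item
    if entry ≠ [] then entry :: tail else tail

def coerce_reference_list_py_alt (raw : List (List (String × String))) : List (List (String × String)) :=
  pvCollect raw 12

-- ===== PRECONDITION & SPEC =====
def Spec_coerce_reference_list_py (raw : List (List (String × String))) (out : List (List (String × String))) : Prop := out = coerce_reference_list_py_alt raw
instance (raw : List (List (String × String))) (out : List (List (String × String))) : Decidable (Spec_coerce_reference_list_py raw out) := by unfold Spec_coerce_reference_list_py; infer_instance

-- ===== CLAIM =====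
def Claim_equal_coerce_reference_list_py : Prop := ∀ (raw : List (List (String × String))), Dom_coerce_reference_list_py raw → Spec_coerce_reference_list_py raw (coerce_reference_list_py raw)

-- ===== LEMMAS AND PROOFS =====

-- per-item: A's three explicit blocks produce B's table-driven entry, and A's
-- skip test (all three clips empty) is exactly 'entry is empty'
theorem pv_body_eq (out : List (List (String × String))) (item : List (String × String)) :
    (let title := pvClip ((PySem.Dict.mk item).get? "title") 200
     let url := pvClip ((PySem.Dict.mk item).get? "url") 500
     let note := pvClip ((PySem.Dict.mk item).get? "note") 500
     if ¬(title ≠ "" ∨ url ≠ "" ∨ note ≠ "") then out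
     else
       let entry : PySem.Dict String String := PySem.Dict.empty
       let entry := if title ≠ "" then entry.insert "title" title else entry
       let entry := if url ≠ "" then entry.insert "url" url else entry
       let entry := if note ≠ "" then entry.insert "note" note else entry
       out ++ [entry.items]) =
    (if pvEntryOf item ≠ [] then out ++ [pvEntryOf item] else out) := by
  simp only [pvEntryOf, pvFields, List.foldl_cons, List.foldl_nil]
  generalize pvClip ((PySem.Dict.mk item).get? "title") 200 = t
  generalize pvClip ((PySem.Dict.mk item).get? "url") 500 = u
  generalize pvClip ((PySem.Dict.mk item).get? "note") 500 = n
  by_cases h1 : t = "" <;> by_cases h2 : u = "" <;> by_cases h3 : n = "" <;>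
    simp [h1, h2, h3, PySem.Dict.insert, PySem.Dict.empty]

-- unfolding equation for pvCollect on a successor budget and a cons
theorem pvCollect_succ_cons (x : List (String × String)) (xs : List (List (String × String))) (b : Nat) :
    pvCollect (x :: xs) (b + 1) =
      (if pvEntryOf x ≠ [] then pvEntryOf x :: pvCollect xs b else pvCollect xs b) := rfl

-- A's left fold over take b, started at acc, appends exactly B's back-to-front result
theorem pv_fold_eq_collect (items : List (List (String × String))) (b : Nat)
    (acc : List (List (String × String))) :
    (items.take b).foldl
      (fun out item =>
        let title := pvClip ((PySem.Dict.mk item).get? "title") 200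
        let url := pvClip ((PySem.Dict.mk item).get? "url") 500
        let note := pvClip ((PySem.Dict.mk item).get? "note") 500
        if ¬(title ≠ "" ∨ url ≠ "" ∨ note ≠ "") then out
        else
          let entry : PySem.Dict String String := PySem.Dict.empty
          let entry := if title ≠ "" then entry.insert "title" title else entry
          let entry := if url ≠ "" then entry.insert "url" url else entry
          let entry := if note ≠ "" then entry.insert "note" note else entry
          out ++ [entry.items]) acc = acc ++ pvCollect items b := by
  induction items generalizing b acc with
  | nil => cases b <;> simp [pvCollect]
  | cons item rest ih =>
    cases b with
    | zero => simp [pvCollect]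
    | succ b' =>
      simp only [List.take_succ_cons, List.foldl_cons]
      rw [pv_body_eq acc item, ih, pvCollect_succ_cons]
      by_cases h : pvEntryOf item ≠ [] <;> simp [h]

-- ===== VERDICT =====
theorem coerce_reference_list_py_spec : Claim_equal_coerce_reference_list_py := by
  intro raw _
  unfold Spec_coerce_reference_list_py coerce_reference_list_py coerce_reference_list_py_alt
  rw [show ((12 : Int)) = ((12 : Nat) : Int) from rfl, PySem.List.slice_to_natCast]
  exact pv_fold_eq_collect raw 12 []
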